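-- pv_equiv track=rewrite | github.com/norbix14/python-unsam | Notas/Ejercicios/ejercicios_python/Clase06/repaso.py | propagar_a_derecha
-- ===== SOURCE A (Python) =====
-- def propagar_a_derecha(l):
--   lista = l.copy()
--   n = len(lista)
--   for i, e in enumerate(lista):
--     if (e == 1) and (i < n - 1):
--       if (lista[i + 1] == 0):
--         lista[i + 1] = 1
--   return lista
-- ===== SOURCE B (Python) =====
-- def propagar_a_derecha(l):
--   result = []
--   prev_is_one = False
--   for e in l:
--     if e == 1 or (e == 0 and prev_is_one):
--       result.append(1)
--       prev_is_one = True
--     else: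
--       result.append(e)
--       prev_is_one = False
--   return result
-- ===== Notes on version B (the rewrite author's own statement) =====
-- stated objective: idiomatic
-- what changed: B builds a fresh output list in one pass with an explicit boolean carry flag (prev_is_one) instead of mutating a copy in place and re-reading the mutated cell at the next iteration.
import Mathlib
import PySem

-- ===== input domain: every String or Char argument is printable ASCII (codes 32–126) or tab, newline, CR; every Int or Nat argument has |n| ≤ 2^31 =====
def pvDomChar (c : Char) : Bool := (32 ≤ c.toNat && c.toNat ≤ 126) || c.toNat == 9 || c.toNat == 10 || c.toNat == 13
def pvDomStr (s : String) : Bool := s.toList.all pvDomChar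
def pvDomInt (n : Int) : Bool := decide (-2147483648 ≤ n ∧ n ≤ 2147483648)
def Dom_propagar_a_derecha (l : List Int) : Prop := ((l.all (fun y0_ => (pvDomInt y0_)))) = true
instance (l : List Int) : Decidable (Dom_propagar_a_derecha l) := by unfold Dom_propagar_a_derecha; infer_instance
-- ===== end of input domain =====

-- B replaces A's in-place mutation of a copied list (read back by the live enumerate
-- iterator) with a one-pass rebuild carrying an explicit boolean flag; same O(n) cost.

-- ===== PORT A =====
-- A's loop: i runs over the live (mutated) list; fuel = number of remaining iterations,
-- fixed at the start as n = len(lista) (the length never changes: set preserves it).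
-- Indices read inside the loop are always in range, so getD's default is never used.
def propagar_a_derecha_go (lista : List Int) (i : Nat) : Nat → List Int
  | 0 => lista
  | fuel + 1 =>
    let e := lista.getD i 0
    let lista' :=
      if e = 1 ∧ i < lista.length - 1 ∧ lista.getD (i + 1) 0 = 0 then
        lista.set (i + 1) 1
      else lista
    propagar_a_derecha_go lista' (i + 1) fuel

def propagar_a_derecha (l : List Int) : List Int :=
  propagar_a_derecha_go l 0 l.length

-- ===== PORT B =====
def propagar_a_derecha_alt_go : List Int → Bool → List Int
  | [], _ => []
  | e :: rest, prev =>
    if e = 1 ∨ (e = 0 ∧ prev = true) then 1 :: propagar_a_derecha_alt_go rest true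
    else e :: propagar_a_derecha_alt_go rest false

def propagar_a_derecha_alt (l : List Int) : List Int :=
  propagar_a_derecha_alt_go l false

-- ===== PRECONDITION & SPEC =====
def Spec_propagar_a_derecha (l : List Int) (out : List Int) : Prop := out = propagar_a_derecha_alt l
instance (l : List Int) (out : List Int) : Decidable (Spec_propagar_a_derecha l out) := by unfold Spec_propagar_a_derecha; infer_instance

-- ===== CLAIM (what is proved, stated in full; the proofs are below) =====
def Claim_equal_propagar_a_derecha : Prop := ∀ (l : List Int), Dom_propagar_a_derecha l → Spec_propagar_a_derecha l (propagar_a_derecha l)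

-- ===== LEMMAS AND PROOFS =====

-- the carry flag is irrelevant when the head is nonzero
theorem bgo_true_of_ne (r : Int) (rest : List Int) (h : r ≠ 0) :
    propagar_a_derecha_alt_go (r :: rest) true = propagar_a_derecha_alt_go (r :: rest) false := by
  simp [propagar_a_derecha_alt_go, h]

theorem key (fuel : Nat) : ∀ (lista : List Int) (i : Nat), i + fuel = lista.length →
    propagar_a_derecha_go lista i fuel =
      lista.take i ++ propagar_a_derecha_alt_go (lista.drop i) false := by
  induction fuel with
  | zero =>
    intro lista i h
    simp at h
    simp [propagar_a_derecha_go, List.take_of_length_le (le_of_eq h.symm),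
      List.drop_of_length_le (le_of_eq h.symm), propagar_a_derecha_alt_go]
  | succ fuel ih =>
    intro lista i h
    have hi : i < lista.length := by omega
    have hdrop : lista.drop i = lista[i] :: lista.drop (i + 1) :=
      List.drop_eq_getElem_cons hi
    have hgd : lista.getD i 0 = lista[i] := List.getD_eq_getElem lista 0 hi
    rw [propagar_a_derecha_go]
    by_cases hc : lista.getD i 0 = 1 ∧ i < lista.length - 1 ∧ lista.getD (i + 1) 0 = 0
    · -- mutation step: lista[i] = 1 and lista[i+1] = 0
      obtain ⟨he, hlt, hz⟩ := hc
      have hi1 : i + 1 < lista.length := by omega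
      have hgd1 : lista.getD (i + 1) 0 = lista[i + 1] := List.getD_eq_getElem lista 0 hi1
      simp only [he, hlt, hz, and_self, if_pos]
      rw [ih (lista.set (i + 1) 1) (i + 1) (by simp; omega)]
      have htake : (lista.set (i + 1) 1).take (i + 1) = lista.take (i + 1) := by
        apply List.ext_getElem <;> simp [List.getElem_set] <;> omega
      have hdrop2 : lista.drop (i + 1) = (0 : Int) :: lista.drop (i + 2) := by
        rw [List.drop_eq_getElem_cons hi1, ← hgd1, hz]
      have hdrop1 : (lista.set (i + 1) 1).drop (i + 1) = (1 : Int) :: lista.drop (i + 2) := by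
        rw [List.drop_set, if_neg (by omega), Nat.sub_self, hdrop2]
        rfl
      have htake2 : lista.take (i + 1) = lista.take i ++ [lista[i]] := by
        rw [List.take_add_one]; simp [List.getElem?_eq_getElem hi]
      rw [htake, hdrop1, hdrop, hdrop2, ← hgd, he, htake2, hgd.symm.trans he]
      simp [propagar_a_derecha_alt_go]
    · -- no mutation
      simp only [hc, if_neg, not_false_iff]
      rw [ih lista (i + 1) (by omega)]
      have htake : lista.take (i + 1) = lista.take i ++ [lista[i]] := by
        rw [List.take_add_one]; simp [List.getElem?_eq_getElem hi]
      rw [htake, hdrop, List.append_assoc]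
      congr 1
      by_cases he : lista[i] = 1
      · -- e = 1 but either last position or next ≠ 0
        have : ¬ (i < lista.length - 1 ∧ lista.getD (i + 1) 0 = 0) := by
          intro hcc; exact hc ⟨by rw [hgd, he], hcc⟩
        simp only [propagar_a_derecha_alt_go, he, true_or, if_pos]
        by_cases hlt : i < lista.length - 1
        · have hi1 : i + 1 < lista.length := by omega
          have hnz : lista[i + 1] ≠ 0 := by
            intro h0; exact this ⟨hlt, by rw [List.getD_eq_getElem lista 0 hi1, h0]⟩
          rw [List.drop_eq_getElem_cons hi1, bgo_true_of_ne _ _ hnz,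
              ← List.drop_eq_getElem_cons hi1]
          simp [List.cons_append]
        · have : lista.drop (i + 1) = [] := List.drop_of_length_le (by omega)
          simp [this, propagar_a_derecha_alt_go]
      · simp [propagar_a_derecha_alt_go, he]

-- ===== VERDICT (by name: the statement is the Claim_ definition above) =====
theorem propagar_a_derecha_spec : Claim_equal_propagar_a_derecha := by
  intro l _
  unfold Spec_propagar_a_derecha propagar_a_derecha propagar_a_derecha_alt
  simpa using key l.length l 0 (by simp)
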